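-- pv_equiv track=rewrite | github.com/sharvilshah1994/LeetCode | KeyBoardRow.py | KeyboardRow
-- ===== SOURCE A (Python) =====
-- def KeyboardRow(words):
--     row1 = ['q', 'w', 'e', 'r', 't', 'y', 'u', 'i', 'o', 'p', '{', '}', '[', ']', '|']
--     row2 = ['a', 's', 'd', 'f', 'g', 'h', 'j', 'k', 'l', ':', ';', '"', "'"]
--     row3 = ['z', 'x', 'c', 'v', 'b', 'n', 'm', '<', ',', '.', '>', '?', '/']
--     temp = []
--     for _ in words:
--         flag = ''
--         for k in _:
--             if k.lower() in row1:
--                 if flag != '1' and flag != '':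
--                     temp.append(_)
--                     break
--                 else:
--                     flag = '1'
--             elif k.lower() in row2:
--                 if (flag != '2') and (flag != ''):
--                     temp.append(_)
--                     break
--                 else:
--                     flag = '2'
--             elif k.lower() in row3:
--                 if flag != '3' and flag != '':
--                     flag = '3'
--                     temp.append(_)
--                     break
--                 else:
--                     flag = '3'
--     for _ in temp:
--         words.remove(_)
--     return words
-- ===== SOURCE B (Python) =====
-- def KeyboardRow(words):
--     rows = [set("qwertyuiop{}[]|"), set("asdfghjkl:;\"'"), set("zxcvbnm<,.>?/")]
--     union = rows[0] | rows[1] | rows[2]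
--
--     def single_row(w):
--         chars = set(c.lower() for c in w) & union
--         return any(chars <= r for r in rows)
--
--     words[:] = [w for w in words if single_row(w)]
--     return words
-- ===== Notes on version B (the rewrite author's own statement) =====
-- stated objective: faster
-- what changed: Replaces A's per-character flag state machine plus collect-then-remove (each remove() rescans the list, O(n^2)) with set algebra: keep a word iff the set of its lowercased row characters is a subset of one keyboard row, rebuilding the list in place with a single filter pass.
import Mathlib
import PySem

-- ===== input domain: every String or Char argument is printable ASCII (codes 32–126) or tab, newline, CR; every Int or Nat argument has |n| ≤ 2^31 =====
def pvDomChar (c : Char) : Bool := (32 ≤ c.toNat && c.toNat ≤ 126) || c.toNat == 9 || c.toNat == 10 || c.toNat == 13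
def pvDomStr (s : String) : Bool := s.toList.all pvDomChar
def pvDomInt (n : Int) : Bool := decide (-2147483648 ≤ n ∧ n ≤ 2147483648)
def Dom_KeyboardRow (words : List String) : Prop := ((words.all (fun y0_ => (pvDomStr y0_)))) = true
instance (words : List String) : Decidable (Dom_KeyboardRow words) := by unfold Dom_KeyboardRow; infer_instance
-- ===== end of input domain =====

-- B replaces A's char-by-char flag state machine with per-word subset tests on character
-- sets (simpler, one filter pass). Both Pythons mutate `words` in place to the same final
-- contents (A via repeated remove, B via words[:] = …); the theorem is about the returned list.

-- ===== PORT A =====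
def pvArow1 : List Char := ['q','w','e','r','t','y','u','i','o','p','{','}','[',']','|']
def pvArow2 : List Char := ['a','s','d','f','g','h','j','k','l',':',';','"','\'']
def pvArow3 : List Char := ['z','x','c','v','b','n','m','<',',','.','>','?','/']

-- the inner `for k in _` loop: returns true iff the word gets appended to temp (break)
def pvAScan (flag : String) (cs : List Char) : Bool :=
  match cs with
  | [] => false
  | k :: rest =>
    if PySem.Chars.lowerChar k ∈ pvArow1 then
      if flag ≠ "1" ∧ flag ≠ "" then true else pvAScan "1" rest
    else if PySem.Chars.lowerChar k ∈ pvArow2 then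
      if flag ≠ "2" ∧ flag ≠ "" then true else pvAScan "2" rest
    else if PySem.Chars.lowerChar k ∈ pvArow3 then
      if flag ≠ "3" ∧ flag ≠ "" then true else pvAScan "3" rest
    else pvAScan flag rest

def KeyboardRow (words : List String) : List String :=
  let temp := words.foldl (fun temp w => if pvAScan "" w.toList then temp ++ [w] else temp) []
  -- Python words.remove(w) removes the first occurrence; every w in temp occurs in words
  -- (temp's entries come from words), so List.erase is exact here
  temp.foldl (fun ws w => ws.erase w) words

-- ===== PORT B =====
def pvBrow1 : PySem.Set Char := PySem.Set.ofList "qwertyuiop{}[]|".toList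
def pvBrow2 : PySem.Set Char := PySem.Set.ofList "asdfghjkl:;\"'".toList
def pvBrow3 : PySem.Set Char := PySem.Set.ofList "zxcvbnm<,.>?/".toList
def pvBrows : List (PySem.Set Char) := [pvBrow1, pvBrow2, pvBrow3]
def pvBunion : PySem.Set Char := PySem.Set.union (PySem.Set.union pvBrow1 pvBrow2) pvBrow3

def pvBsingleRow (w : String) : Bool :=
  let chars := PySem.Set.inter (PySem.Set.ofList (w.toList.map PySem.Chars.lowerChar)) pvBunion
  pvBrows.any (fun r => PySem.Set.issubset chars r)

def KeyboardRow_alt (words : List String) : List String :=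
  words.filter pvBsingleRow

-- ===== PRECONDITION & SPEC =====
def Spec_KeyboardRow (words : List String) (out : List String) : Prop := out = KeyboardRow_alt words
instance (words : List String) (out : List String) : Decidable (Spec_KeyboardRow words out) := by unfold Spec_KeyboardRow; infer_instance

-- ===== CLAIM (what is proved, stated in full; the proofs are below) =====
def Claim_equal_KeyboardRow : Prop := ∀ (words : List String), Dom_KeyboardRow words → Spec_KeyboardRow words (KeyboardRow words)

-- ===== LEMMAS AND PROOFS =====

-- which row a character belongs to, with A's elif priority
def pvRowOf (c : Char) : Option String :=
  if PySem.Chars.lowerChar c ∈ pvArow1 then some "1"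
  else if PySem.Chars.lowerChar c ∈ pvArow2 then some "2"
  else if PySem.Chars.lowerChar c ∈ pvArow3 then some "3"
  else none

def pvAll (cs : List Char) (f : String) : Prop :=
  ∀ c ∈ cs, pvRowOf c = none ∨ pvRowOf c = some f

lemma pv_disj12 : ∀ x : Char, x ∈ pvArow1 → x ∈ pvArow2 → False := by
  intro x h; fin_cases h <;> decide

lemma pv_disj13 : ∀ x : Char, x ∈ pvArow1 → x ∈ pvArow3 → False := by
  intro x h; fin_cases h <;> decide

lemma pv_disj23 : ∀ x : Char, x ∈ pvArow2 → x ∈ pvArow3 → False := by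
  intro x h; fin_cases h <;> decide

lemma pv_scan_false_flag (cs : List Char) :
    ∀ f, (f = "1" ∨ f = "2" ∨ f = "3") → (pvAScan f cs = false ↔ pvAll cs f) := by
  induction cs with
  | nil => intro f _; simp [pvAScan, pvAll]
  | cons c rest ih =>
    intro f hf
    have ih1 := ih "1" (by left; rfl)
    have ih2 := ih "2" (by right; left; rfl)
    have ih3 := ih "3" (by right; right; rfl)
    rcases hf with rfl | rfl | rfl <;>
      by_cases h1 : PySem.Chars.lowerChar c ∈ pvArow1 <;>
      by_cases h2 : PySem.Chars.lowerChar c ∈ pvArow2 <;>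
      by_cases h3 : PySem.Chars.lowerChar c ∈ pvArow3 <;>
      simp [pvAScan, pvAll, pvRowOf, h1, h2, h3, ih1, ih2, ih3]

lemma pv_scan_false_empty (cs : List Char) :
    pvAScan "" cs = false ↔ pvAll cs "1" ∨ pvAll cs "2" ∨ pvAll cs "3" := by
  induction cs with
  | nil => simp [pvAScan, pvAll]
  | cons c rest ih =>
    have s1 := pv_scan_false_flag rest "1" (by left; rfl)
    have s2 := pv_scan_false_flag rest "2" (by right; left; rfl)
    have s3 := pv_scan_false_flag rest "3" (by right; right; rfl)
    by_cases h1 : PySem.Chars.lowerChar c ∈ pvArow1 <;>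
    by_cases h2 : PySem.Chars.lowerChar c ∈ pvArow2 <;>
    by_cases h3 : PySem.Chars.lowerChar c ∈ pvArow3 <;>
    simp [pvAScan, pvAll, pvRowOf, h1, h2, h3, s1, s2, s3, ih]

-- the three row strings in Source B list exactly the chars of A's row lists
lemma pv_row1_eq : "qwertyuiop{}[]|".toList = pvArow1 := by decide
lemma pv_row2_eq : "asdfghjkl:;\"'".toList = pvArow2 := by decide
lemma pv_row3_eq : "zxcvbnm<,.>?/".toList = pvArow3 := by decide

lemma pv_mem_union (x : Char) :
    x ∈ pvBunion ↔ x ∈ pvArow1 ∨ x ∈ pvArow2 ∨ x ∈ pvArow3 := by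
  unfold pvBunion pvBrow1 pvBrow2 pvBrow3
  rw [pv_row1_eq, pv_row2_eq, pv_row3_eq]
  simp [PySem.Set.mem_union, PySem.Set.mem_ofList, or_assoc]

lemma pv_char1 (c : Char) :
    ((PySem.Chars.lowerChar c ∈ pvArow1 ∨ PySem.Chars.lowerChar c ∈ pvArow2 ∨ PySem.Chars.lowerChar c ∈ pvArow3) → PySem.Chars.lowerChar c ∈ pvArow1)
      ↔ (pvRowOf c = none ∨ pvRowOf c = some "1") := by
  by_cases h1 : PySem.Chars.lowerChar c ∈ pvArow1 <;>
  by_cases h2 : PySem.Chars.lowerChar c ∈ pvArow2 <;>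
  by_cases h3 : PySem.Chars.lowerChar c ∈ pvArow3 <;>
  simp [pvRowOf, h1, h2, h3]

lemma pv_char2 (c : Char) :
    ((PySem.Chars.lowerChar c ∈ pvArow1 ∨ PySem.Chars.lowerChar c ∈ pvArow2 ∨ PySem.Chars.lowerChar c ∈ pvArow3) → PySem.Chars.lowerChar c ∈ pvArow2)
      ↔ (pvRowOf c = none ∨ pvRowOf c = some "2") := by
  by_cases h1 : PySem.Chars.lowerChar c ∈ pvArow1 <;>
  by_cases h2 : PySem.Chars.lowerChar c ∈ pvArow2 <;>
  by_cases h3 : PySem.Chars.lowerChar c ∈ pvArow3 <;>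
  simp [pvRowOf, h1, h2, h3] <;>
  first
    | tauto
    | exact (pv_disj12 _ h1 h2).elim

lemma pv_char3 (c : Char) :
    ((PySem.Chars.lowerChar c ∈ pvArow1 ∨ PySem.Chars.lowerChar c ∈ pvArow2 ∨ PySem.Chars.lowerChar c ∈ pvArow3) → PySem.Chars.lowerChar c ∈ pvArow3)
      ↔ (pvRowOf c = none ∨ pvRowOf c = some "3") := by
  by_cases h1 : PySem.Chars.lowerChar c ∈ pvArow1 <;>
  by_cases h2 : PySem.Chars.lowerChar c ∈ pvArow2 <;>
  by_cases h3 : PySem.Chars.lowerChar c ∈ pvArow3 <;>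
  simp [pvRowOf, h1, h2, h3] <;>
  first
    | tauto
    | exact (pv_disj12 _ h1 h2).elim
    | exact (pv_disj13 _ h1 h3).elim
    | exact (pv_disj23 _ h2 h3).elim

lemma pv_mem_brow1 (x : Char) : x ∈ pvBrow1 ↔ x ∈ pvArow1 := by
  unfold pvBrow1; rw [pv_row1_eq]; simp [PySem.Set.mem_ofList]

lemma pv_mem_brow2 (x : Char) : x ∈ pvBrow2 ↔ x ∈ pvArow2 := by
  unfold pvBrow2; rw [pv_row2_eq]; simp [PySem.Set.mem_ofList]

lemma pv_mem_brow3 (x : Char) : x ∈ pvBrow3 ↔ x ∈ pvArow3 := by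
  unfold pvBrow3; rw [pv_row3_eq]; simp [PySem.Set.mem_ofList]

lemma pv_subset1 (w : String) :
    PySem.Set.issubset (PySem.Set.inter (PySem.Set.ofList (w.toList.map PySem.Chars.lowerChar)) pvBunion) pvBrow1 = true
      ↔ pvAll w.toList "1" := by
  simp only [PySem.Set.issubset_iff, PySem.Set.mem_inter, PySem.Set.mem_ofList,
    List.mem_map, pv_mem_union, pv_mem_brow1, pvAll]
  constructor
  · intro h c hc
    rw [← pv_char1 c]
    intro hm
    exact h _ ⟨⟨c, hc, rfl⟩, hm⟩
  · intro h x hx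
    obtain ⟨⟨c, hc, rfl⟩, hm⟩ := hx
    exact (pv_char1 c).mpr (h c hc) hm

lemma pv_subset2 (w : String) :
    PySem.Set.issubset (PySem.Set.inter (PySem.Set.ofList (w.toList.map PySem.Chars.lowerChar)) pvBunion) pvBrow2 = true
      ↔ pvAll w.toList "2" := by
  simp only [PySem.Set.issubset_iff, PySem.Set.mem_inter, PySem.Set.mem_ofList,
    List.mem_map, pv_mem_union, pv_mem_brow2, pvAll]
  constructor
  · intro h c hc
    rw [← pv_char2 c]
    intro hm
    exact h _ ⟨⟨c, hc, rfl⟩, hm⟩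
  · intro h x hx
    obtain ⟨⟨c, hc, rfl⟩, hm⟩ := hx
    exact (pv_char2 c).mpr (h c hc) hm

lemma pv_subset3 (w : String) :
    PySem.Set.issubset (PySem.Set.inter (PySem.Set.ofList (w.toList.map PySem.Chars.lowerChar)) pvBunion) pvBrow3 = true
      ↔ pvAll w.toList "3" := by
  simp only [PySem.Set.issubset_iff, PySem.Set.mem_inter, PySem.Set.mem_ofList,
    List.mem_map, pv_mem_union, pv_mem_brow3, pvAll]
  constructor
  · intro h c hc
    rw [← pv_char3 c]
    intro hm
    exact h _ ⟨⟨c, hc, rfl⟩, hm⟩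
  · intro h x hx
    obtain ⟨⟨c, hc, rfl⟩, hm⟩ := hx
    exact (pv_char3 c).mpr (h c hc) hm

lemma pv_single_row_iff (w : String) :
    pvBsingleRow w = true ↔ pvAll w.toList "1" ∨ pvAll w.toList "2" ∨ pvAll w.toList "3" := by
  simp only [pvBsingleRow, pvBrows, List.any_cons, List.any_nil, Bool.or_false,
    Bool.or_eq_true, pv_subset1, pv_subset2, pv_subset3]

lemma pv_pointwise (w : String) : pvBsingleRow w = ! pvAScan "" w.toList := by
  rcases h : pvAScan "" w.toList with _ | _
  · have := (pv_scan_false_empty w.toList).mp h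
    simp [(pv_single_row_iff w).mpr this]
  · have : ¬ (pvAll w.toList "1" ∨ pvAll w.toList "2" ∨ pvAll w.toList "3") := by
      intro hc
      have := (pv_scan_false_empty w.toList).mpr hc
      simp [h] at this
    rcases hb : pvBsingleRow w with _ | _
    · rfl
    · exact absurd ((pv_single_row_iff w).mp hb) this

lemma pv_foldl_erase_cons (ts : List String) (w : String) (h : ∀ t ∈ ts, t ≠ w) :
    ∀ l : List String, ts.foldl (fun ws t => ws.erase t) (w :: l) = w :: ts.foldl (fun ws t => ws.erase t) l := by
  induction ts with
  | nil => intro l; simp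
  | cons t ts ih =>
    intro l
    have hne : t ≠ w := h t (by simp)
    have : (w :: l).erase t = w :: l.erase t := by
      rw [List.erase_cons]
      simp [Ne.symm hne]
    simp only [List.foldl_cons, this]
    exact ih (fun t' ht' => h t' (by simp [ht'])) _

lemma pv_foldl_erase_filter (p : String → Bool) (ws : List String) :
    (ws.filter p).foldl (fun l t => l.erase t) ws = ws.filter (fun w => ! p w) := by
  induction ws with
  | nil => simp
  | cons w ws ih =>
    by_cases hp : p w
    · simp only [List.filter_cons, hp, if_pos, List.foldl_cons]
      have : (w :: ws).erase w = ws := by simp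
      simp [this, ih]
    · have hfilter : (w :: ws).filter p = ws.filter p := by simp [hp]
      have hne : ∀ t ∈ ws.filter p, t ≠ w := by
        intro t ht rfl
        exact hp (List.of_mem_filter ht)
      rw [hfilter, pv_foldl_erase_cons _ _ hne, ih]
      simp [hp]

-- ===== VERDICT (by name: the statement is the Claim_ definition above) =====
theorem KeyboardRow_spec : Claim_equal_KeyboardRow := by
  intro words _
  unfold Spec_KeyboardRow KeyboardRow KeyboardRow_alt
  simp only []
  rw [PySem.List.foldl_append_if_eq_filter]
  simp only [List.nil_append]
  rw [pv_foldl_erase_filter]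
  apply List.filter_congr
  intro w _
  rw [pv_pointwise]
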